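-- pv_equiv track=rewrite | github.com/tckmn/caveman-duels | players/Feint/Feint.py | sharpness
-- ===== SOURCE A (Python) =====
-- def sharpness(history):
--     ret = 0
--     for action in history:
--         if action == 'S':
--             ret += 1
--         elif action == 'P' and ret > 0:
--             ret -= 1
--     return ret
-- ===== SOURCE B (Python) =====
-- def sharpness(history):
--     s = 0
--     m = 0
--     for action in history:
--         if action == 'S':
--             s += 1
--         elif action == 'P':
--             s -= 1
--         if s < m:
--             m = s
--     return s - m
-- ===== Notes on version B (the rewrite author's own statement) =====
-- stated objective: alternative
-- what changed: Replaces the clamped-at-zero counter with an unclamped running balance plus its historical minimum (including the empty prefix), returning balance minus minimum via the reflected-walk identity.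
import Mathlib
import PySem

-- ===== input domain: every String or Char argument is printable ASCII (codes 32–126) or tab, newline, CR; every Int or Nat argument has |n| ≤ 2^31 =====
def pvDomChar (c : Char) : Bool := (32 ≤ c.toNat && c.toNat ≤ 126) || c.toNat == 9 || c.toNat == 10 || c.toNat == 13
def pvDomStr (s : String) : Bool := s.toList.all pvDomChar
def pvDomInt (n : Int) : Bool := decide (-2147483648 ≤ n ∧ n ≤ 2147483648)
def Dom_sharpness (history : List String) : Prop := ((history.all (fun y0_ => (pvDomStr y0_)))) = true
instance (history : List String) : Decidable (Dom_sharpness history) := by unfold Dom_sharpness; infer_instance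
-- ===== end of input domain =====

-- ===== PORT A =====
-- B maintains the unclamped balance and its running minimum instead of a clamped counter.
def sharpness (history : List String) : Int :=
  history.foldl (fun ret action =>
    if action = "S" then ret + 1
    else if action = "P" ∧ ret > 0 then ret - 1
    else ret) 0

-- ===== PORT B =====
def sharpness_alt (history : List String) : Int :=
  let sm := history.foldl (fun (sm : Int × Int) action =>
    let s := if action = "S" then sm.1 + 1
             else if action = "P" then sm.1 - 1
             else sm.1
    (s, if s < sm.2 then s else sm.2)) (0, 0)
  sm.1 - sm.2

-- ===== PRECONDITION & SPEC =====
def Spec_sharpness (history : List String) (out : Int) : Prop := out = sharpness_alt history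
instance (history : List String) (out : Int) : Decidable (Spec_sharpness history out) := by unfold Spec_sharpness; infer_instance

-- ===== CLAIM (what is proved, stated in full; the proofs are below) =====
def Claim_equal_sharpness : Prop := ∀ (history : List String), Dom_sharpness history → Spec_sharpness history (sharpness history)

-- ===== LEMMAS AND PROOFS =====
-- Loop invariant: if m ≤ s, A's clamped fold from s - m equals B's fold result s' - m'.
theorem sharpness_inv (history : List String) : ∀ (s m : Int), m ≤ s →
    (history.foldl (fun ret action =>
      if action = "S" then ret + 1
      else if action = "P" ∧ ret > 0 then ret - 1
      else ret) (s - m))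
    = (let sm := history.foldl (fun (sm : Int × Int) action =>
        let s := if action = "S" then sm.1 + 1
                 else if action = "P" then sm.1 - 1
                 else sm.1
        (s, if s < sm.2 then s else sm.2)) (s, m)
       sm.1 - sm.2) := by
  induction history with
  | nil => intro s m _; simp
  | cons a t ih =>
    intro s m hm
    simp only [List.foldl_cons]
    by_cases hS : a = "S"
    · subst hS
      have h1 : ¬ (s + 1 < m) := by omega
      simpa [h1, show s - m + 1 = s + 1 - m from by ring] using ih (s+1) m (by omega)
    · by_cases hP : a = "P"
      · subst hP
        by_cases hpos : s - m > 0
        · have h1 : ¬ (s - 1 < m) := by omega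
          simpa [hS, hpos, show m < s from by omega, h1, show s - m - 1 = s - 1 - m from by ring]
            using ih (s-1) m (by omega)
        · have hsm : m = s := by omega
          subst hsm
          simpa [hS, hpos, show m - 1 < m from by omega, show m - m = m - 1 - (m - 1) from by ring]
            using ih (m-1) (m-1) le_rfl
      · have h1 : ¬ (s < m) := by omega
        simpa [hS, hP, h1] using ih s m hm

-- ===== VERDICT (by name: the statement is the Claim_ definition above) =====
theorem sharpness_spec : Claim_equal_sharpness := by
  intro history _
  unfold Spec_sharpness sharpness sharpness_alt
  simpa using sharpness_inv history 0 0 le_rfl
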